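-- pv_equiv track=rewrite | github.com/optcom-org/optcom | optcom/utils/utilities_helpers/list_helpers.py | list_repetition_bool_map
-- ===== SOURCE A (Python) =====
-- from typing import Any, Callable, List, Optional, overload, Set, Tuple, Union
--
-- def list_repetition_indices(x: List[Any]) -> List[List[int]]:
--     """Return a list with repeated elements index in the initial list.
--     """
--     unique_elems: List[Any] = []
--     inds: List[List[int]] = []
--     for i, elem in enumerate(x):
--         if (elem not in unique_elems):
--             unique_elems.append(elem)
--             inds.append([i])
--         else:
--             inds[unique_elems.index(elem)].append(i)
--
--     return inds
--
-- def list_repetition_bool_map(x: List[Any], highlight_first_elem: bool = True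
--                              ) -> List[bool]:
--     """Return a bool list of same dimension as the input list where the
--     repeated element are set to False, else True.
--
--     Parameters
--     ----------
--     x :
--         List to consider.
--     highlight_first_elem :
--         If True, set to True the first occurrence of a repeated element,
--         else set to True the last occurence of a repeated element.
--
--     """
--     res: List[bool] = [False for i in range(len(x))]
--     ind_map = list_repetition_indices(x)
--     for inds in ind_map:
--         if (highlight_first_elem):
--             res[inds[0]] = True
--         else:
--             res[inds[-1]] = True
--
--     return res
-- ===== SOURCE B (Python) =====
-- def list_repetition_bool_map(x, highlight_first_elem=True):
--     """Return a bool list marking the first (or last) occurrence of each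
--     element True and every other occurrence False."""
--     def first_pass(seq):
--         out = []
--         seen = []
--         for elem in seq:
--             if elem not in seen:
--                 seen.append(elem)
--                 out.append(True)
--             else:
--                 out.append(False)
--         return out
--     if highlight_first_elem:
--         return first_pass(x)
--     res = first_pass(x[::-1])
--     res.reverse()
--     return res
-- ===== Notes on version B (the rewrite author's own statement) =====
-- stated objective: simpler
-- what changed: B marks booleans inline in one linear scan with a seen list (scanning the reversed list for the last-occurrence case) instead of building the grouped index table of list_repetition_indices and then setting booleans through it.
import Mathlib
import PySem

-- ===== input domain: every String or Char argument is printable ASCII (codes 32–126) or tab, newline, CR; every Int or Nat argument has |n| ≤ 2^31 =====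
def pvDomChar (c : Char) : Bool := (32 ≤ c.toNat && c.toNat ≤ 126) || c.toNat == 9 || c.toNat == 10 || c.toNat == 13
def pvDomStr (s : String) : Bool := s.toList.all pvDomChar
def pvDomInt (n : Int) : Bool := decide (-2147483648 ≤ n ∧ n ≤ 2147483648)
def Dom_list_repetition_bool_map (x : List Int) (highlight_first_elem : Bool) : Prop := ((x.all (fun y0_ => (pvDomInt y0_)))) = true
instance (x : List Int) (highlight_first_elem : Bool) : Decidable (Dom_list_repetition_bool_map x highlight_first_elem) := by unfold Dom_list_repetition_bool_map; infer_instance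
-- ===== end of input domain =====

-- B replaces A's grouped index table (list_repetition_indices) by one inline linear scan
-- with a seen list (scanning the reversed list for the last-occurrence case): simpler.

-- ===== PORT A =====
-- step of the loop in list_repetition_indices (Python: for i, elem in enumerate(x): …)
def lriStep (st : List Int × List (List Int)) (p : Int × Int) : List Int × List (List Int) :=
  if p.2 ∉ st.1 then (st.1 ++ [p.2], st.2 ++ [[p.1]])
  else match PySem.List.index? st.1 p.2 with
    | some j => (st.1, st.2.set j (st.2.getD j [] ++ [p.1]))  -- inds[unique_elems.index(elem)].append(i)
    | none => st                                              -- unreachable: elem ∈ unique_elems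

def list_repetition_indices (x : List Int) : List (List Int) :=
  ((PySem.List.enumerate x 0).foldl lriStep ([], [])).2

def list_repetition_bool_map (x : List Int) (highlight_first_elem : Bool) : List Bool :=
  let res := (PySem.List.pyRange 0 (x.length : Int) 1).map (fun _ => false)
  (list_repetition_indices x).foldl (fun res inds =>
    if highlight_first_elem then PySem.List.pySetD res (PySem.List.pyGetD inds 0 0) true
    else PySem.List.pySetD res (PySem.List.pyGetD inds (-1) 0) true) res

-- ===== PORT B =====
-- first_pass: one scan, keeping (out, seen)
def lrbmPass (seq : List Int) : List Bool × List Int :=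
  seq.foldl (fun st elem =>
    if elem ∉ st.2 then (st.1 ++ [true], st.2 ++ [elem])
    else (st.1 ++ [false], st.2)) ([], [])

def list_repetition_bool_map_alt (x : List Int) (highlight_first_elem : Bool) : List Bool :=
  if highlight_first_elem then (lrbmPass x).1
  else ((lrbmPass x.reverse).1).reverse

-- ===== PRECONDITION & SPEC =====
def Spec_list_repetition_bool_map (x : List Int) (highlight_first_elem : Bool) (out : List Bool) : Prop := out = list_repetition_bool_map_alt x highlight_first_elem
instance (x : List Int) (highlight_first_elem : Bool) (out : List Bool) : Decidable (Spec_list_repetition_bool_map x highlight_first_elem out) := by unfold Spec_list_repetition_bool_map; infer_instance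

-- ===== CLAIM (what is proved, stated in full; the proofs are below) =====
def Claim_equal_list_repetition_bool_map : Prop := ∀ (x : List Int) (highlight_first_elem : Bool), Dom_list_repetition_bool_map x highlight_first_elem → Spec_list_repetition_bool_map x highlight_first_elem (list_repetition_bool_map x highlight_first_elem)

-- ===== LEMMAS AND PROOFS =====

-- the "seen" accumulator common to both sides
def pvSeenStep (s : List Int) (e : Int) : List Int := if e ∈ s then s else s ++ [e]

-- closed form of B's pass output
def pvMark (seen : List Int) : List Int → List Bool
  | [] => []
  | e :: t => decide (e ∉ seen) :: pvMark (pvSeenStep seen e) t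

-- the list of indices (offset s) at which u occurs
def pvOcc (u : Int) (s : Int) : List Int → List Int
  | [] => []
  | e :: t => if e = u then s :: pvOcc u (s + 1) t else pvOcc u (s + 1) t

theorem mem_pvSeenStep (s : List Int) (e a : Int) : a ∈ pvSeenStep s e ↔ a ∈ s ∨ a = e := by
  unfold pvSeenStep; split_ifs with h
  · exact ⟨Or.inl, fun x => x.elim id (fun hae => hae ▸ h)⟩
  · simp

theorem nodup_pvSeenStep (s : List Int) (e : Int) (h : s.Nodup) : (pvSeenStep s e).Nodup := by
  unfold pvSeenStep; split_ifs with he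
  · exact h
  · simpa [List.nodup_append] using ⟨h, fun a ha hae => he (hae ▸ ha)⟩

theorem mem_foldl_seen (l : List Int) : ∀ (seen : List Int) (a : Int),
    a ∈ l.foldl pvSeenStep seen ↔ a ∈ seen ∨ a ∈ l := by
  induction l with
  | nil => simp
  | cons e t ih =>
    intro seen a
    simp only [List.foldl_cons, ih, mem_pvSeenStep, List.mem_cons]
    tauto

theorem nodup_foldl_seen (l : List Int) : ∀ (seen : List Int), seen.Nodup →
    (l.foldl pvSeenStep seen).Nodup := by
  induction l with
  | nil => intro seen h; exact h
  | cons e t ih => intro seen h; exact ih _ (nodup_pvSeenStep _ _ h)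

theorem length_pvMark (l : List Int) : ∀ seen, (pvMark seen l).length = l.length := by
  induction l with
  | nil => simp [pvMark]
  | cons e t ih => intro seen; simp [pvMark, ih]

theorem getElem_pvMark (l : List Int) : ∀ (seen : List Int) (i : Nat) (hi : i < l.length),
    (pvMark seen l)[i]'(by rw [length_pvMark]; exact hi) =
      decide (l[i] ∉ seen ∧ l[i] ∉ l.take i) := by
  induction l with
  | nil => intro _ i hi; simp at hi
  | cons e t ih =>
    intro seen i hi
    cases i with
    | zero => simp [pvMark]
    | succ i =>
      have hi' : i < t.length := by simpa using hi
      simp only [pvMark, List.getElem_cons_succ, List.take_succ_cons]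
      rw [ih (pvSeenStep seen e) i hi', decide_eq_decide]
      rw [mem_pvSeenStep]
      constructor
      · rintro ⟨h1, h2⟩
        refine ⟨fun hs => h1 (Or.inl hs), ?_⟩
        intro hmem
        rcases List.mem_cons.mp hmem with he | ht
        · exact h1 (Or.inr he)
        · exact h2 ht
      · rintro ⟨h1, h2⟩
        refine ⟨?_, fun ht => h2 (List.mem_cons.mpr (Or.inr ht))⟩
        rintro (hs | he)
        · exact h1 hs
        · exact h2 (List.mem_cons.mpr (Or.inl he))

theorem lrbmPass_fold (l : List Int) : ∀ (out : List Bool) (seen : List Int),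
    (l.foldl (fun st elem =>
      if elem ∉ st.2 then (st.1 ++ [true], st.2 ++ [elem])
      else (st.1 ++ [false], st.2)) (out, seen)) =
    (out ++ pvMark seen l, l.foldl pvSeenStep seen) := by
  induction l with
  | nil => simp [pvMark]
  | cons e t ih =>
    intro out seen
    by_cases h : e ∈ seen
    · simp only [List.foldl_cons]
      rw [if_neg (not_not_intro h), ih]
      have hstep : pvSeenStep seen e = seen := by simp [pvSeenStep, h]
      simp [pvMark, hstep, h]
    · simp only [List.foldl_cons]
      rw [if_pos h, ih]
      have hstep : pvSeenStep seen e = seen ++ [e] := by simp [pvSeenStep, h]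
      simp [pvMark, hstep, h]

theorem lrbmPass_eq (l : List Int) : lrbmPass l = (pvMark [] l, l.foldl pvSeenStep []) := by
  unfold lrbmPass; rw [lrbmPass_fold]; simp

-- pvOcc basic facts
theorem pvOcc_nil_of_not_mem (l : List Int) : ∀ (u s : Int), u ∉ l → pvOcc u s l = [] := by
  induction l with
  | nil => simp [pvOcc]
  | cons e t ih =>
    intro u s hu
    simp only [List.mem_cons, not_or] at hu
    have he : ¬ e = u := fun h => hu.1 h.symm
    simp [pvOcc, he, ih u (s + 1) hu.2]

theorem pvOcc_ne_nil_of_mem (l : List Int) : ∀ (u s : Int), u ∈ l → pvOcc u s l ≠ [] := by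
  induction l with
  | nil => simp
  | cons e t ih =>
    intro u s hu
    by_cases he : e = u
    · simp [pvOcc, he]
    · have : u ∈ t := by
        rcases List.mem_cons.mp hu with h | h
        · exact absurd h.symm he
        · exact h
      simp [pvOcc, he, ih u (s + 1) this]

theorem pvOcc_append (p : List Int) : ∀ (u s : Int) (e : Int),
    pvOcc u s (p ++ [e]) = pvOcc u s p ++ (if e = u then [s + (p.length : Int)] else []) := by
  induction p with
  | nil => intro u s e; simp [pvOcc]
  | cons a t ih =>
    intro u s e
    by_cases ha : a = u
    · simp only [List.cons_append, pvOcc, if_pos ha, ih u (s + 1) e]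
      simp only [List.length_cons]
      push_cast
      ring_nf
    · simp only [List.cons_append, pvOcc, if_neg ha, ih u (s + 1) e]
      simp only [List.length_cons]
      push_cast
      ring_nf

-- head of pvOcc = first-occurrence index
theorem pvOcc_head_first (l : List Int) : ∀ (s : Int) (i : Nat) (hi : i < l.length),
    l[i] ∉ l.take i → PySem.List.pyGetD (pvOcc (l[i]) s l) 0 0 = s + (i : Int) := by
  induction l with
  | nil => intro _ i hi; simp at hi
  | cons e t ih =>
    intro s i hi hf
    cases i with
    | zero => simp [pvOcc, PySem.List.pyGetD_zero]
    | succ i =>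
      have hi' : i < t.length := by simpa using hi
      simp only [List.take_succ_cons, List.mem_cons, not_or, List.getElem_cons_succ] at hf
      have hne : ¬ e = t[i] := fun h => hf.1 h.symm
      have hrec := ih (s + 1) i hi' hf.2
      simp only [List.getElem_cons_succ, pvOcc, if_neg hne, hrec]
      push_cast; ring

theorem pvOcc_head_mem (l : List Int) : ∀ (u s : Int), u ∈ l →
    ∃ (i : Nat) (hi : i < l.length), l[i] = u ∧ l[i] ∉ l.take i ∧
      PySem.List.pyGetD (pvOcc u s l) 0 0 = s + (i : Int) := by
  induction l with
  | nil => simp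
  | cons e t ih =>
    intro u s hu
    by_cases he : e = u
    · exact ⟨0, by simp, by simpa using he, by simp, by simp [pvOcc, he, PySem.List.pyGetD_zero]⟩
    · have hut : u ∈ t := by
        rcases List.mem_cons.mp hu with h | h
        · exact absurd h.symm he
        · exact h
      obtain ⟨i, hi, hgi, htk, hhd⟩ := ih u (s + 1) hut
      refine ⟨i + 1, by simpa using Nat.succ_lt_succ hi, by simpa using hgi, ?_, ?_⟩
      · simp only [List.take_succ_cons, List.mem_cons, not_or, List.getElem_cons_succ]
        exact ⟨by rw [hgi]; exact fun h => he h.symm, htk⟩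
      · simp only [pvOcc, if_neg he, hhd]
        push_cast; ring

-- helper: pyGetD (a :: l) (-1) 0 = pyGetD l (-1) 0 when l ≠ []
theorem pyGetD_neg_one_cons (a : Int) (l : List Int) (h : l ≠ []) :
    PySem.List.pyGetD (a :: l) (-1) 0 = PySem.List.pyGetD l (-1) 0 := by
  rw [PySem.List.pyGetD_neg_one _ _ (by simp : (a :: l) ≠ []),
    PySem.List.pyGetD_neg_one _ _ h, List.getLast_cons h]

-- last of pvOcc = last-occurrence index
theorem pvOcc_last_last (l : List Int) : ∀ (s : Int) (i : Nat) (hi : i < l.length),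
    l[i] ∉ l.drop (i + 1) → PySem.List.pyGetD (pvOcc (l[i]) s l) (-1) 0 = s + (i : Int) := by
  induction l with
  | nil => intro _ i hi; simp at hi
  | cons e t ih =>
    intro s i hi hl
    cases i with
    | zero =>
      simp only [List.getElem_cons_zero, List.drop_succ_cons, List.drop_zero] at hl
      have h0 : pvOcc e s (e :: t) = [s] := by
        simp [pvOcc, pvOcc_nil_of_not_mem t e (s + 1) hl]
      simp only [List.getElem_cons_zero, h0]
      rw [PySem.List.pyGetD_neg_one _ _ (by simp : ([s] : List Int) ≠ [])]
      simp
    | succ i =>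
      have hi' : i < t.length := by simpa using hi
      simp only [List.drop_succ_cons, List.getElem_cons_succ] at hl
      have hrec := ih (s + 1) i hi' hl
      have hmem : t[i] ∈ t := List.getElem_mem hi'
      have hne : pvOcc (t[i]) (s + 1) t ≠ [] := pvOcc_ne_nil_of_mem t _ (s + 1) hmem
      simp only [List.getElem_cons_succ]
      by_cases he : e = t[i]
      · have h1 : pvOcc (t[i]) s (e :: t) = s :: pvOcc (t[i]) (s + 1) t := by
          simp [pvOcc, he]
        rw [h1, pyGetD_neg_one_cons _ _ hne, hrec]
        push_cast; ring
      · have h1 : pvOcc (t[i]) s (e :: t) = pvOcc (t[i]) (s + 1) t := by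
          simp [pvOcc, he]
        rw [h1, hrec]
        push_cast; ring

theorem pvOcc_last_mem (l : List Int) : ∀ (u s : Int), u ∈ l →
    ∃ (i : Nat) (hi : i < l.length), l[i] = u ∧ l[i] ∉ l.drop (i + 1) ∧
      PySem.List.pyGetD (pvOcc u s l) (-1) 0 = s + (i : Int) := by
  induction l with
  | nil => simp
  | cons e t ih =>
    intro u s hu
    by_cases hut : u ∈ t
    · obtain ⟨i, hi, hgi, hdr, hlst⟩ := ih u (s + 1) hut
      have hne : pvOcc u (s + 1) t ≠ [] := pvOcc_ne_nil_of_mem t u (s + 1) hut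
      refine ⟨i + 1, by simpa using Nat.succ_lt_succ hi, by simpa using hgi, ?_, ?_⟩
      · simpa using hdr
      · by_cases he : e = u
        · have h1 : pvOcc u s (e :: t) = s :: pvOcc u (s + 1) t := by simp [pvOcc, he]
          rw [h1, pyGetD_neg_one_cons _ _ hne, hlst]
          push_cast; ring
        · have h1 : pvOcc u s (e :: t) = pvOcc u (s + 1) t := by simp [pvOcc, he]
          rw [h1, hlst]
          push_cast; ring
    · have he : e = u := by
        rcases List.mem_cons.mp hu with h | h
        · exact h.symm
        · exact absurd h hut
      refine ⟨0, by simp, by simpa using he, by simpa using (he ▸ hut), ?_⟩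
      have h0 : pvOcc u s (e :: t) = [s] := by
        simp [pvOcc, he, pvOcc_nil_of_not_mem t u (s + 1) hut]
      rw [h0, PySem.List.pyGetD_neg_one _ _ (by simp : ([s] : List Int) ≠ [])]
      simp

-- ===== invariant of A's list_repetition_indices loop =====

theorem lri_inv (s : List Int) : ∀ (p : List Int),
    (PySem.List.enumerate s ((p.length : Int))).foldl lriStep
      (p.foldl pvSeenStep [], (p.foldl pvSeenStep []).map (fun u => pvOcc u 0 p)) =
    ((p ++ s).foldl pvSeenStep [], ((p ++ s).foldl pvSeenStep []).map (fun u => pvOcc u 0 (p ++ s))) := by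
  induction s with
  | nil => intro p; simp [PySem.List.enumerate]
  | cons e t ih =>
    intro p
    rw [PySem.List.enumerate_cons]
    have hmem : e ∈ p.foldl pvSeenStep [] ↔ e ∈ p := by
      rw [mem_foldl_seen]; simp
    have hnodup : (p.foldl pvSeenStep []).Nodup := nodup_foldl_seen p [] (by simp)
    have hseen_app : (p ++ [e]).foldl pvSeenStep [] = pvSeenStep (p.foldl pvSeenStep []) e := by
      rw [List.foldl_append]; simp
    have hstep :
        lriStep (p.foldl pvSeenStep [], (p.foldl pvSeenStep []).map (fun u => pvOcc u 0 p))
          ((p.length : Int), e) =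
        ((p ++ [e]).foldl pvSeenStep [],
          ((p ++ [e]).foldl pvSeenStep []).map (fun u => pvOcc u 0 (p ++ [e]))) := by
      by_cases hep : e ∈ p
      · -- elem already seen: index?-branch
        have hin : e ∈ p.foldl pvSeenStep [] := hmem.mpr hep
        have hsome : (PySem.List.index? (p.foldl pvSeenStep []) e).isSome :=
          (PySem.List.index?_isSome_iff _ _).mpr hin
        obtain ⟨j, hj⟩ := Option.isSome_iff_exists.mp hsome
        have hj' := hj
        rw [PySem.List.index?_eq_idxOf?] at hj'
        obtain ⟨hjlt, hgj, -⟩ := List.idxOf?_eq_some_iff.mp hj'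
        have hseen' : (p ++ [e]).foldl pvSeenStep [] = p.foldl pvSeenStep [] := by
          rw [hseen_app]; simp [pvSeenStep, hin]
        simp only [lriStep, if_neg (not_not_intro hin), hj]
        rw [hseen']
        simp only [Prod.mk.injEq]
        refine ⟨trivial, ?_⟩
        apply List.ext_getElem
        · simp
        · intro k hk1 hk2
          simp only [List.getElem_set, List.getElem_map]
          by_cases hkj : j = k
          · subst hkj
            have hgd : ((p.foldl pvSeenStep []).map (fun u => pvOcc u 0 p)).getD j [] =
                pvOcc e 0 p := by
              rw [List.getD_eq_getElem _ _ (by simpa using hjlt)]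
              simp [hgj]
            rw [if_pos rfl, hgd]
            have hk2' : j < (p.foldl pvSeenStep []).length := by simpa using hk2
            rw [show ((p.foldl pvSeenStep [])[j]'hk2') = e from hgj]
            rw [pvOcc_append]
            simp
          · rw [if_neg hkj]
            have hk2' : k < (p.foldl pvSeenStep []).length := by simpa using hk2
            have hne : (p.foldl pvSeenStep [])[k]'hk2' ≠ e := by
              intro hEq
              exact hkj ((List.Nodup.getElem_inj_iff hnodup).mp (hgj.trans hEq.symm))
            rw [pvOcc_append]
            have : ¬ e = (p.foldl pvSeenStep [])[k]'hk2' := fun h => hne h.symm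
            simp [this]
      · -- new elem
        have hnotin : e ∉ p.foldl pvSeenStep [] := fun h => hep (hmem.mp h)
        have hseen' : (p ++ [e]).foldl pvSeenStep [] = p.foldl pvSeenStep [] ++ [e] := by
          rw [hseen_app]; simp [pvSeenStep, hnotin]
        simp only [lriStep, if_pos hnotin]
        rw [hseen']
        simp only [Prod.mk.injEq]
        refine ⟨trivial, ?_⟩
        rw [List.map_append]
        have h1 : (p.foldl pvSeenStep []).map (fun u => pvOcc u 0 (p ++ [e])) =
            (p.foldl pvSeenStep []).map (fun u => pvOcc u 0 p) := by
          apply List.map_congr_left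
          intro u hu
          have hup : u ∈ p := by
            have := (mem_foldl_seen p [] u).mp hu
            simpa using this
          have hune : ¬ e = u := fun h => hep (h ▸ hup)
          rw [pvOcc_append]
          simp [hune]
        have h2 : ([e] : List Int).map (fun u => pvOcc u 0 (p ++ [e])) = [[(p.length : Int)]] := by
          rw [List.map_singleton, pvOcc_append]
          simp [pvOcc_nil_of_not_mem p e 0 hep]
        rw [h1, h2]
    rw [List.foldl_cons, hstep]
    have hlen : (p.length : Int) + 1 = (((p ++ [e]).length : Nat) : Int) := by
      simp
    rw [hlen, ih (p ++ [e])]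
    simp

theorem lri_eq (x : List Int) :
    list_repetition_indices x = (x.foldl pvSeenStep []).map (fun u => pvOcc u 0 x) := by
  have := lri_inv x []
  simp only [List.length_nil, Int.natCast_zero, List.foldl_nil, List.map_nil,
    List.nil_append] at this
  unfold list_repetition_indices
  rw [this]

-- ===== the set-fold on the result list =====

theorem setfold_getD (ks : List Int) : ∀ (res : List Bool), (∀ k ∈ ks, 0 ≤ k) →
    ∀ (i : Nat),
    (ks.foldl (fun r k => PySem.List.pySetD r k true) res).getD i false =
      if ((i : Int) ∈ ks ∧ i < res.length) then true else res.getD i false := by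
  induction ks with
  | nil => simp
  | cons k t ih =>
    intro res hk i
    have hk0 : (0 : Int) ≤ k := hk k (by simp)
    rw [List.foldl_cons, ih _ (fun a ha => hk a (by simp [ha])) i]
    have hlen : (PySem.List.pySetD res k true).length = res.length :=
      PySem.List.length_pySetD res k true
    have hset : (PySem.List.pySetD res k true).getD i false =
        if ((i : Int) = k ∧ i < res.length) then true else res.getD i false := by
      rw [PySem.List.pySetD_of_nonneg _ _ hk0]
      by_cases hlt : i < res.length
      · rw [List.getD_eq_getElem _ _ (by simpa using hlt), List.getElem_set,
          List.getD_eq_getElem _ _ hlt]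
        have : (k.toNat = i) ↔ ((i : Int) = k) := by omega
        by_cases h : (i : Int) = k
        · rw [if_pos (this.mpr h), if_pos ⟨h, hlt⟩]
        · rw [if_neg (fun hh => h (this.mp hh)), if_neg (by tauto)]
      · rw [List.getD_eq_default _ _ (by simpa using Nat.le_of_not_lt hlt),
          List.getD_eq_default _ _ (Nat.le_of_not_lt hlt), if_neg (by tauto)]
    rw [hlen, hset]
    by_cases h1 : (i : Int) ∈ t <;> by_cases h2 : (i : Int) = k <;>
      by_cases h3 : i < res.length <;> simp [h1, h2, h3]

-- length and entries of A's initial result list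
theorem res0_length (x : List Int) :
    ((PySem.List.pyRange 0 (x.length : Int) 1).map (fun _ => false)).length = x.length := by
  rw [PySem.List.pyRange_zero_natCast]
  simp

theorem res0_getD (x : List Int) (i : Nat) :
    ((PySem.List.pyRange 0 (x.length : Int) 1).map (fun _ => false)).getD i false = false := by
  by_cases h : i < ((PySem.List.pyRange 0 (x.length : Int) 1).map (fun _ => false)).length
  · rw [List.getD_eq_getElem _ _ h]
    simp
  · rw [List.getD_eq_default _ _ (Nat.le_of_not_lt h)]

-- the fold in A preserves length whatever the flag is
theorem foldA_length (h : Bool) (gs : List (List Int)) : ∀ (res : List Bool),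
    (gs.foldl (fun res inds =>
      if h then PySem.List.pySetD res (PySem.List.pyGetD inds 0 0) true
      else PySem.List.pySetD res (PySem.List.pyGetD inds (-1) 0) true) res).length = res.length := by
  induction gs with
  | nil => simp
  | cons g t ih =>
    intro res
    rw [List.foldl_cons, ih]
    cases h <;> simp [PySem.List.length_pySetD]

theorem A_length (x : List Int) (h : Bool) :
    (list_repetition_bool_map x h).length = x.length := by
  unfold list_repetition_bool_map
  simp only []
  rw [foldA_length, res0_length]

-- A as a plain fold of index-sets over the keys list
theorem A_eq_setfold_true (x : List Int) : list_repetition_bool_map x true =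
    ((x.foldl pvSeenStep []).map (fun u => PySem.List.pyGetD (pvOcc u 0 x) 0 0)).foldl
      (fun r k => PySem.List.pySetD r k true)
      ((PySem.List.pyRange 0 (x.length : Int) 1).map (fun _ => false)) := by
  unfold list_repetition_bool_map
  simp only []
  rw [lri_eq, List.foldl_map, List.foldl_map]
  congr 1

theorem A_eq_setfold_false (x : List Int) : list_repetition_bool_map x false =
    ((x.foldl pvSeenStep []).map (fun u => PySem.List.pyGetD (pvOcc u 0 x) (-1) 0)).foldl
      (fun r k => PySem.List.pySetD r k true)
      ((PySem.List.pyRange 0 (x.length : Int) 1).map (fun _ => false)) := by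
  unfold list_repetition_bool_map
  simp only []
  rw [lri_eq, List.foldl_map, List.foldl_map]
  congr 1

theorem keys_first_nonneg (x : List Int) :
    ∀ k ∈ (x.foldl pvSeenStep []).map (fun u => PySem.List.pyGetD (pvOcc u 0 x) 0 0), 0 ≤ k := by
  intro k hk
  obtain ⟨u, hu, rfl⟩ := List.mem_map.mp hk
  have hux : u ∈ x := by
    have := (mem_foldl_seen x [] u).mp hu
    simpa using this
  obtain ⟨i', hi', -, -, hhd⟩ := pvOcc_head_mem x u 0 hux
  rw [hhd]; omega

theorem keys_last_nonneg (x : List Int) :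
    ∀ k ∈ (x.foldl pvSeenStep []).map (fun u => PySem.List.pyGetD (pvOcc u 0 x) (-1) 0), 0 ≤ k := by
  intro k hk
  obtain ⟨u, hu, rfl⟩ := List.mem_map.mp hk
  have hux : u ∈ x := by
    have := (mem_foldl_seen x [] u).mp hu
    simpa using this
  obtain ⟨i', hi', -, -, hhd⟩ := pvOcc_last_mem x u 0 hux
  rw [hhd]; omega

theorem keys_first_mem (x : List Int) (i : Nat) (hi : i < x.length) :
    ((i : Int) ∈ (x.foldl pvSeenStep []).map (fun u => PySem.List.pyGetD (pvOcc u 0 x) 0 0)) ↔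
      x[i] ∉ x.take i := by
  rw [List.mem_map]
  constructor
  · rintro ⟨u, hu, hkey⟩
    have hux : u ∈ x := by
      have := (mem_foldl_seen x [] u).mp hu
      simpa using this
    obtain ⟨i', hi', hgi, htk, hhd⟩ := pvOcc_head_mem x u 0 hux
    rw [hhd] at hkey
    have hii : i' = i := by omega
    subst hii
    rw [hgi]
    rw [hgi] at htk
    exact htk
  · intro htk
    refine ⟨x[i], ?_, ?_⟩
    · rw [mem_foldl_seen]; right; exact List.getElem_mem hi
    · rw [pvOcc_head_first x 0 i hi htk]; simp

theorem keys_last_mem (x : List Int) (i : Nat) (hi : i < x.length) :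
    ((i : Int) ∈ (x.foldl pvSeenStep []).map (fun u => PySem.List.pyGetD (pvOcc u 0 x) (-1) 0)) ↔
      x[i] ∉ x.drop (i + 1) := by
  rw [List.mem_map]
  constructor
  · rintro ⟨u, hu, hkey⟩
    have hux : u ∈ x := by
      have := (mem_foldl_seen x [] u).mp hu
      simpa using this
    obtain ⟨i', hi', hgi, hdr, hhd⟩ := pvOcc_last_mem x u 0 hux
    rw [hhd] at hkey
    have hii : i' = i := by omega
    subst hii
    rw [hgi]
    rw [hgi] at hdr
    exact hdr
  · intro hdr
    refine ⟨x[i], ?_, ?_⟩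
    · rw [mem_foldl_seen]; right; exact List.getElem_mem hi
    · rw [pvOcc_last_last x 0 i hi hdr]; simp

theorem A_getD_true (x : List Int) (i : Nat) (hi : i < x.length) :
    (list_repetition_bool_map x true).getD i false = decide (x[i] ∉ x.take i) := by
  rw [A_eq_setfold_true, setfold_getD _ _ (keys_first_nonneg x) i]
  by_cases h : x[i] ∉ x.take i
  · rw [if_pos ⟨(keys_first_mem x i hi).mpr h, by rw [res0_length]; exact hi⟩]
    simp [h]
  · rw [if_neg (fun hc => h ((keys_first_mem x i hi).mp hc.1)), res0_getD]
    simp [h]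

theorem A_getD_false (x : List Int) (i : Nat) (hi : i < x.length) :
    (list_repetition_bool_map x false).getD i false = decide (x[i] ∉ x.drop (i + 1)) := by
  rw [A_eq_setfold_false, setfold_getD _ _ (keys_last_nonneg x) i]
  by_cases h : x[i] ∉ x.drop (i + 1)
  · rw [if_pos ⟨(keys_last_mem x i hi).mpr h, by rw [res0_length]; exact hi⟩]
    simp [h]
  · rw [if_neg (fun hc => h ((keys_last_mem x i hi).mp hc.1)), res0_getD]
    simp [h]

theorem B_length (x : List Int) (h : Bool) :
    (list_repetition_bool_map_alt x h).length = x.length := by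
  unfold list_repetition_bool_map_alt
  cases h
  · simp [lrbmPass_eq, length_pvMark]
  · simp [lrbmPass_eq, length_pvMark]

theorem B_getD_true (x : List Int) (i : Nat) (hi : i < x.length) :
    (list_repetition_bool_map_alt x true).getD i false = decide (x[i] ∉ x.take i) := by
  unfold list_repetition_bool_map_alt
  rw [if_pos rfl, lrbmPass_eq]
  rw [List.getD_eq_getElem _ _ (by rw [length_pvMark]; exact hi)]
  rw [getElem_pvMark x [] i hi]
  simp

theorem B_getD_false (x : List Int) (i : Nat) (hi : i < x.length) :
    (list_repetition_bool_map_alt x false).getD i false = decide (x[i] ∉ x.drop (i + 1)) := by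
  unfold list_repetition_bool_map_alt
  rw [if_neg (by simp), lrbmPass_eq]
  have hlenr : (pvMark [] x.reverse).length = x.length := by
    rw [length_pvMark]; simp
  have hi2 : i < (pvMark [] x.reverse).reverse.length := by
    rw [List.length_reverse, hlenr]; exact hi
  rw [List.getD_eq_getElem _ _ hi2, List.getElem_reverse]
  have hidx : (pvMark [] x.reverse).length - 1 - i = x.length - 1 - i := by rw [hlenr]
  simp only [hidx]
  have hj : x.length - 1 - i < x.reverse.length := by
    simp only [List.length_reverse]; omega
  rw [getElem_pvMark x.reverse [] (x.length - 1 - i) hj]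
  rw [decide_eq_decide]
  have hrev : x.reverse[x.length - 1 - i]'hj = x[i] := by
    rw [List.getElem_reverse]
    congr 1
    omega
  have htake : x.reverse.take (x.length - 1 - i) = (x.drop (i + 1)).reverse := by
    have harg : x.length - 1 - i = x.length - (i + 1) := by omega
    rw [harg, List.take_reverse]
    have harg2 : x.length - (x.length - (i + 1)) = i + 1 := by omega
    rw [harg2]
  rw [hrev, htake]
  simp

-- ===== VERDICT (by name: the statement is the Claim_ definition above) =====
theorem list_repetition_bool_map_spec : Claim_equal_list_repetition_bool_map := by
  intro x h _
  unfold Spec_list_repetition_bool_map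
  apply List.ext_getElem
  · rw [A_length, B_length]
  · intro i h1 h2
    have hi : i < x.length := by rw [A_length] at h1; exact h1
    rw [← List.getD_eq_getElem _ false h1, ← List.getD_eq_getElem _ false h2]
    cases h
    · rw [A_getD_false x i hi, B_getD_false x i hi]
    · rw [A_getD_true x i hi, B_getD_true x i hi]
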